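-- pv_equiv track=rewrite | github.com/rrwt/daily-coding-challenge | others/stack/number_of_nge_to_the_right.py | nge_to_the_right
-- ===== SOURCE A (Python) =====
-- def nge_to_the_right(elements: list) -> list:
--     """
--     Solution: Iterate over the list in reverse and store nge for each
--     time complexity: O(n)
--     space complexity: O(n)
--     time complexity to answer queries (what's nge for this index) = O(1) (afterwards)
--     """
--     l: int = len(elements)
--     stack: list = [l - 1]
--     result: list = [0] * l
--     index: int = l - 2
--
--     for i in range(l - 2, -1, -1):
--         while stack and elements[i] >= elements[stack[-1]]:
--             stack.pop()
--
--         if stack: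
--             result[index] = result[stack[-1]] + 1
--
--         stack.append(index)
--         index -= 1
--
--     return result
-- ===== SOURCE B (Python) =====
-- def nge_to_the_right(elements: list) -> list:
--     """Brute force: for each index, follow the next-greater chain by rescanning."""
--     n = len(elements)
--
--     def count_from(i: int) -> int:
--         c = 0
--         j = i
--         while True:
--             k = next((k for k in range(j + 1, n) if elements[k] > elements[j]), None)
--             if k is None:
--                 return c
--             c += 1
--             j = k
--
--     return [count_from(i) for i in range(n)]
-- ===== Notes on version B (the rewrite author's own statement) =====
-- stated objective: alternative
-- what changed: Replaces the reverse-pass monotonic stack with dynamic programming on stored counts by a direct brute-force chain walk: for each index, repeatedly rescan the suffix for the first strictly greater element and hop to it, counting hops.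
import Mathlib
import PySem

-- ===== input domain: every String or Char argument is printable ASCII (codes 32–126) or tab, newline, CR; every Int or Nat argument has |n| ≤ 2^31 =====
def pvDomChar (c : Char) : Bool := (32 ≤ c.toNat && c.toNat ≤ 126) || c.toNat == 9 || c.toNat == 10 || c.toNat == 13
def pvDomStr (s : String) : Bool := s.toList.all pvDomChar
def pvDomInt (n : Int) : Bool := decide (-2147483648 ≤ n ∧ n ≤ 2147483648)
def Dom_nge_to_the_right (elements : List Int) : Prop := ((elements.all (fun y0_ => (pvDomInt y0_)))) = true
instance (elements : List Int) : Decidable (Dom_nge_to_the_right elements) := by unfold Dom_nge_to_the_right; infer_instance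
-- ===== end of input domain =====

-- B replaces A's reverse-pass monotonic stack + stored counts with a per-index
-- brute-force chain walk (rescan for the first strictly greater element, hop, count).

-- ===== PORT A =====
-- The Python stack grows/pops at the END; here the HEAD is the Python stack top
-- (stack[-1]), so append = cons and pop = tail.
-- the inner 'while stack and elements[i] >= elements[stack[-1]]: stack.pop()'
def pvPopA (a : List Int) (x : Int) : List Int → List Int
  | [] => []
  | t :: rest => if x ≥ PySem.List.pyGetD a t 0 then pvPopA a x rest else t :: rest

-- one body of 'for i in range(l - 2, -1, -1)' (Python's 'index' always equals i)
def pvStepA (a : List Int) (i : Nat) (stack result : List Int) : List Int × List Int :=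
  let stack' := pvPopA a (PySem.List.pyGetD a (i : Int) 0) stack
  let result' := match stack' with
    | [] => result
    | t :: _ => PySem.List.pySetD result (i : Int) (PySem.List.pyGetD result t 0 + 1)
  ((i : Int) :: stack', result')

-- the for-loop: fuel n runs the bodies i = n-1, n-2, …, 0
def pvLoopA (a : List Int) : Nat → List Int → List Int → List Int × List Int
  | 0, stack, result => (stack, result)
  | n+1, stack, result =>
      let st := pvStepA a n stack result
      pvLoopA a n st.1 st.2

def nge_to_the_right (elements : List Int) : List Int :=
  let l := elements.length
  (pvLoopA elements (l - 1) [(l : Int) - 1] (List.replicate l 0)).2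

-- ===== PORT B =====
-- 'next((k for k in range(k0, n) if elements[k] > v), None)'
def pvFindG (a : List Int) (v : Int) (k : Nat) : Option Nat :=
  if h : k < a.length then
    if v < a[k] then some k else pvFindG a v (k + 1)
  else none
termination_by a.length - k

-- bounds of the found index (cited by pvChase's decreasing_by)
theorem pvFindG_bounds (a : List Int) (v : Int) (k m : Nat)
    (h : pvFindG a v k = some m) : k ≤ m ∧ m < a.length := by
  fun_induction pvFindG a v k with
  | case1 k hk hlt => injection h with h; omega
  | case2 k hk hlt ih => have := ih h; omega
  | case3 k hk => simp_all

-- the 'while True' chain walk of count_from, with accumulator c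
def pvChase (a : List Int) (j : Nat) (c : Int) : Int :=
  match h : pvFindG a (PySem.List.pyGetD a (j : Int) 0) (j + 1) with
  | none => c
  | some k => pvChase a k (c + 1)
termination_by a.length - j
decreasing_by have := pvFindG_bounds _ _ _ _ h; omega

def nge_to_the_right_alt (elements : List Int) : List Int :=
  (List.range elements.length).map (fun i => pvChase elements i 0)

-- ===== PRECONDITION & SPEC =====
def Spec_nge_to_the_right (elements : List Int) (out : List Int) : Prop := out = nge_to_the_right_alt elements
instance (elements : List Int) (out : List Int) : Decidable (Spec_nge_to_the_right elements out) := by unfold Spec_nge_to_the_right; infer_instance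

-- ===== CLAIM (what is proved, stated in full; the proofs are below) =====
def Claim_equal_nge_to_the_right : Prop := ∀ (elements : List Int), Dom_nge_to_the_right elements → Spec_nge_to_the_right elements (nge_to_the_right elements)

-- ===== LEMMAS AND PROOFS =====

-- full characterisation of pvFindG when it finds an index
theorem pvFindG_spec (a : List Int) (v : Int) (k m : Nat)
    (h : pvFindG a v k = some m) :
    k ≤ m ∧ m < a.length ∧ v < a.getD m 0 ∧
      ∀ j, k ≤ j → j < m → ¬ v < a.getD j 0 := by
  fun_induction pvFindG a v k with
  | case1 k hk hlt =>
      injection h with h; subst h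
      exact ⟨le_refl _, hk, by rw [List.getD_eq_getElem a 0 hk]; exact hlt, by omega⟩
  | case2 k hk hlt ih =>
      obtain ⟨h1, h2, h3, h4⟩ := ih h
      refine ⟨by omega, h2, h3, ?_⟩
      intro j hj1 hj2
      rcases Nat.eq_or_lt_of_le hj1 with rfl | hj1'
      · rw [List.getD_eq_getElem a 0 hk]; omega
      · exact h4 j hj1' hj2
  | case3 k hk => simp_all

theorem pvFindG_none (a : List Int) (v : Int) (k : Nat)
    (h : pvFindG a v k = none) :
    ∀ j, k ≤ j → j < a.length → ¬ v < a.getD j 0 := by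
  fun_induction pvFindG a v k with
  | case1 k hk hlt => simp_all
  | case2 k hk hlt ih =>
      intro j hj1 hj2
      rcases Nat.eq_or_lt_of_le hj1 with rfl | hj1'
      · rw [List.getD_eq_getElem a 0 hk]; omega
      · exact ih h j hj1' hj2
  | case3 k hk => intro j hj1 hj2; omega

-- skipping indices that are not greater does not change the find
theorem pvFindG_skip (a : List Int) (v : Int) (k k' : Nat) (hkk : k ≤ k')
    (hno : ∀ j, k ≤ j → j < k' → j < a.length → ¬ v < a.getD j 0) :
    pvFindG a v k = pvFindG a v k' := by
  induction k' with
  | zero => have : k = 0 := by omega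
            subst this; rfl
  | succ k' ih =>
      rcases Nat.eq_or_lt_of_le hkk with rfl | hlt
      · rfl
      · have hk' : k ≤ k' := by omega
        rw [ih hk' (fun j h1 h2 h3 => hno j h1 (by omega) h3)]
        by_cases hl : k' < a.length
        · rw [pvFindG]
          simp only [hl, dif_pos]
          rw [if_neg (by have := hno k' hk' (by omega) hl; rw [List.getD_eq_getElem a 0 hl] at this; omega)]
        · rw [pvFindG, pvFindG]
          simp [hl, show ¬ k' + 1 < a.length by omega]

-- the accumulator of pvChase is additive
theorem pvChase_shift (a : List Int) (j : Nat) (c : Int) :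
    pvChase a j c = c + pvChase a j 0 := by
  rw [pvChase.eq_def, pvChase.eq_def]
  split
  · ring
  · next k h1 =>
      rw [pvChase_shift a k (c + 1), pvChase_shift a k (0 + 1)]; ring
termination_by a.length - j
decreasing_by all_goals rename_i hfg; have := pvFindG_bounds _ _ _ _ hfg; omega

-- the chain of next-greater hops starting at j (top-first image of A's stack)
def pvChain (a : List Int) (j : Nat) : List Int :=
  match h : pvFindG a (PySem.List.pyGetD a (j : Int) 0) (j + 1) with
  | none => [(j : Int)]
  | some k => (j : Int) :: pvChain a k
termination_by a.length - j
decreasing_by have := pvFindG_bounds _ _ _ _ h; omega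

-- equation lemmas for the dependent matches of pvChain / pvChase
theorem pvChain_none (a : List Int) (j : Nat)
    (hch : pvFindG a (PySem.List.pyGetD a (j : Int) 0) (j + 1) = none) :
    pvChain a j = [(j : Int)] := by
  rw [pvChain.eq_def]; split <;> simp_all

theorem pvChain_some (a : List Int) (j k : Nat)
    (hch : pvFindG a (PySem.List.pyGetD a (j : Int) 0) (j + 1) = some k) :
    pvChain a j = (j : Int) :: pvChain a k := by
  rw [pvChain.eq_def]; split <;> simp_all

theorem pvChase_none (a : List Int) (j : Nat) (c : Int)
    (hch : pvFindG a (PySem.List.pyGetD a (j : Int) 0) (j + 1) = none) :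
    pvChase a j c = c := by
  rw [pvChase.eq_def]; split <;> simp_all

theorem pvChase_some (a : List Int) (j k : Nat) (c : Int)
    (hch : pvFindG a (PySem.List.pyGetD a (j : Int) 0) (j + 1) = some k) :
    pvChase a j c = pvChase a k (c + 1) := by
  rw [pvChase.eq_def]; split <;> simp_all

-- pvFindG finds nothing at or past the length
theorem pvFindG_ge_len (a : List Int) (v : Int) (k : Nat) (hk : a.length ≤ k) :
    pvFindG a v k = none := by
  rw [pvFindG]; simp [show ¬ k < a.length by omega]

-- popping the chain leaves exactly the chain of the first strictly greater index
theorem pvPopA_chain (a : List Int) (v : Int) (j : Nat) (hj : j < a.length) :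
    pvPopA a v (pvChain a j) =
      match pvFindG a v j with
      | none => []
      | some k => pvChain a k := by
  have hvj : PySem.List.pyGetD a (j : Int) 0 = a[j] := by
    rw [PySem.List.pyGetD_natCast, List.getD_eq_getElem a 0 hj]
  cases hch : pvFindG a (PySem.List.pyGetD a (j : Int) 0) (j + 1) with
  | none =>
      have hnone := pvFindG_none _ _ _ hch
      rw [pvChain_none a j hch, pvPopA]
      by_cases hv : v < a[j]
      · rw [if_neg (by rw [hvj]; omega)]
        have hfj : pvFindG a v j = some j := by
          rw [pvFindG]; simp only [hj, dif_pos]; rw [if_pos hv]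
        rw [hfj]
        exact (pvChain_none a j hch).symm
      · rw [if_pos (by rw [hvj]; omega), pvPopA]
        have hfj : pvFindG a v j = none := by
          rw [pvFindG_skip a v j a.length (by omega) ?_, pvFindG_ge_len a v a.length le_rfl]
          intro m h1 h2 h3
          rcases Nat.eq_or_lt_of_le h1 with rfl | h1'
          · rw [List.getD_eq_getElem a 0 hj]; omega
          · have := hnone m h1' h3
            rw [hvj] at this
            rw [List.getD_eq_getElem a 0 h3] at this ⊢
            omega
        rw [hfj]
  | some k =>
      have hb := pvFindG_bounds _ _ _ _ hch
      have hs := pvFindG_spec _ _ _ _ hch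
      rw [pvChain_some a j k hch, pvPopA]
      by_cases hv : v < a[j]
      · rw [if_neg (by rw [hvj]; omega)]
        have hfj : pvFindG a v j = some j := by
          rw [pvFindG]; simp only [hj, dif_pos]; rw [if_pos hv]
        rw [hfj]
        exact (pvChain_some a j k hch).symm
      · rw [if_pos (by rw [hvj]; omega)]
        rw [pvPopA_chain a v k (by omega)]
        have hfj : pvFindG a v j = pvFindG a v k := by
          apply pvFindG_skip a v j k (by omega)
          intro m h1 h2 h3
          rcases Nat.eq_or_lt_of_le h1 with rfl | h1'
          · rw [List.getD_eq_getElem a 0 hj]; omega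
          · have := hs.2.2.2 m h1' h2
            rw [hvj] at this
            rw [List.getD_eq_getElem a 0 h3] at this ⊢
            omega
        rw [hfj]
termination_by a.length - j
decreasing_by omega

-- the result array after the iterations i = n, …, l-1 have run (others still 0)
def pvR (a : List Int) (n : Nat) : List Int :=
  (List.range a.length).map (fun j => if n ≤ j then pvChase a j 0 else 0)

theorem pvStepA_inv (a : List Int) (n : Nat) (hn : n + 1 < a.length) :
    pvStepA a n (pvChain a (n + 1)) (pvR a (n + 1)) = (pvChain a n, pvR a n) := by
  cases hch : pvFindG a (PySem.List.pyGetD a (n : Int) 0) (n + 1) with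
  | none =>
      have hpop : pvPopA a (PySem.List.pyGetD a (n : Int) 0) (pvChain a (n + 1)) = [] := by
        rw [pvPopA_chain a _ (n + 1) hn, hch]
      simp only [pvStepA, hpop]
      rw [pvChain_none a n hch]
      refine Prod.ext rfl ?_
      simp only [pvR]
      apply List.map_congr_left
      intro j hj
      rcases Nat.lt_trichotomy j n with h | rfl | h
      · simp [show ¬ n ≤ j by omega, show ¬ n + 1 ≤ j by omega]
      · simp [pvChase_none a j 0 hch, show ¬ j + 1 ≤ j by omega]
      · simp [show n ≤ j by omega, show n + 1 ≤ j by omega]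
  | some k =>
      have hb := pvFindG_bounds _ _ _ _ hch
      obtain ⟨t, ht⟩ : ∃ t, pvChain a k = (k : Int) :: t := by
        rw [pvChain.eq_def]; split
        · exact ⟨[], rfl⟩
        · exact ⟨_, rfl⟩
      have hpop : pvPopA a (PySem.List.pyGetD a (n : Int) 0) (pvChain a (n + 1)) = (k : Int) :: t := by
        rw [pvPopA_chain a _ (n + 1) hn, hch]
        exact ht
      simp only [pvStepA, hpop]
      refine Prod.ext ?_ ?_
      · simp only
        rw [← ht]
        exact (pvChain_some a n k hch).symm
      · simp only [PySem.List.pySetD_natCast, PySem.List.pyGetD_natCast]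
        have hkv : (pvR a (n + 1)).getD k 0 = pvChase a k 0 := by
          have hklen : k < (pvR a (n + 1)).length := by simp [pvR]; omega
          rw [List.getD_eq_getElem _ 0 hklen]
          simp [pvR]
          intro hle
          exact absurd hle (by omega)
        rw [hkv]
        have hcn : pvChase a n 0 = pvChase a k 0 + 1 := by
          rw [pvChase_some a n k 0 hch, pvChase_shift]; ring
        apply List.ext_getElem
        · simp [pvR]
        · intro i h1 h2
          simp only [pvR] at h2 ⊢
          rw [List.getElem_set]
          simp only [List.getElem_map, List.getElem_range]
          simp only [List.length_set] at h1
          rcases Nat.lt_trichotomy i n with h | rfl | h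
          · rw [if_neg (by omega)]
            simp [show ¬ n ≤ i by omega, show ¬ n + 1 ≤ i by omega]
          · rw [if_pos rfl]
            simp [hcn]
          · rw [if_neg (by omega)]
            simp [show n ≤ i by omega, show n + 1 ≤ i by omega]

theorem pvLoopA_inv (a : List Int) (n : Nat) (hn : n < a.length) :
    pvLoopA a n (pvChain a n) (pvR a n) = (pvChain a 0, pvR a 0) := by
  induction n with
  | zero => rfl
  | succ n ih =>
      rw [pvLoopA, pvStepA_inv a n hn]
      exact ih (by omega)

-- ===== VERDICT (by name: the statement is the Claim_ definition above) =====
theorem nge_to_the_right_spec : Claim_equal_nge_to_the_right := by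
  intro a _hdom
  unfold Spec_nge_to_the_right nge_to_the_right nge_to_the_right_alt
  rcases Nat.eq_zero_or_pos a.length with h0 | hpos
  · rw [List.length_eq_zero_iff] at h0
    subst h0
    rfl
  · simp only
    have hlast : pvFindG a (PySem.List.pyGetD a ((a.length - 1 : Nat) : Int) 0) (a.length - 1 + 1) = none :=
      pvFindG_ge_len _ _ _ (by omega)
    have h1 : [(a.length : Int) - 1] = pvChain a (a.length - 1) := by
      rw [pvChain_none a (a.length - 1) hlast]
      congr 1
      omega
    have h2 : List.replicate a.length (0 : Int) = pvR a (a.length - 1) := by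
      apply List.ext_getElem
      · simp [pvR]
      · intro i hi1 hi2
        simp only [List.getElem_replicate, pvR, List.getElem_map, List.getElem_range]
        simp only [List.length_replicate] at hi1
        rcases Nat.lt_or_ge i (a.length - 1) with h | h
        · simp [show ¬ a.length - 1 ≤ i by omega]
        · have : i = a.length - 1 := by omega
          subst this
          simp [pvChase_none a _ 0 hlast]
    rw [h1, h2, pvLoopA_inv a (a.length - 1) (by omega)]
    simp [pvR]
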